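-- pv_equiv track=rewrite | github.com/miliar/Code_Jam_Webscraper | solutions_python/Problem_155/1446.py | count
-- ===== SOURCE A (Python) =====
-- def count(line):
-- 	p = 0
-- 	if len(line) == 0: return p
--
-- 	for i in range(1,len(line)):
-- 		if line[i] and sum(line[:i]) < i:
-- 			add = i - sum(line[:i])
-- 			p += add
-- 			line[0] += add
-- 	return p
-- ===== SOURCE B (Python) =====
-- def count(line):
--     # O(n): maintain the running prefix sum (including the adjustments that
--     # A applies to line[0]) instead of recomputing sum(line[:i]) each step.
--     # Does not mutate its argument (A updates line[0] in place); return value only.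
--     p = 0
--     if not line:
--         return 0
--     s = line[0]
--     i = 1
--     for x in line[1:]:
--         if x and s < i:
--             p += i - s
--             s = i
--         s += x
--         i += 1
--     return p
-- ===== Notes on version B (the rewrite author's own statement) =====
-- stated objective: faster
-- what changed: B replaces A's per-iteration sum(line[:i]) recomputation (and in-place mutation of line[0]) by a single pass with an incrementally maintained running prefix sum.
import Mathlib
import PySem

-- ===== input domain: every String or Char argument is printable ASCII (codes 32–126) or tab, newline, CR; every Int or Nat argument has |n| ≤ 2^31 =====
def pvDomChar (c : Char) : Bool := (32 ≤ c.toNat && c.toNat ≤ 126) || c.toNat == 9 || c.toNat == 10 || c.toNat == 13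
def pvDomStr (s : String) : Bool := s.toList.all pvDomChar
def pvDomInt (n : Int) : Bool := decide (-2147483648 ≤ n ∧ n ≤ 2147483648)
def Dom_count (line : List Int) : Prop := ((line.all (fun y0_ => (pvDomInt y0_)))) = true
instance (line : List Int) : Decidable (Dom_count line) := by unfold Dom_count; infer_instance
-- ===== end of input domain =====

-- B replaces A's repeated sum(line[:i]) recomputation by one pass with a running
-- prefix sum (A also mutates line[0] in place; the equivalence is about the return value only).


-- ===== PORT A =====
-- one loop iteration of A: i is the current index; the state is (p, line) since A
-- mutates line[0]. All indexing is in range (1 ≤ i < len), so `.getD 0` is exact.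
def stepA (st : Int × List Int) (i : Int) : Int × List Int :=
  let p := st.1
  let l := st.2
  if (PySem.List.pyGet? l i).getD 0 ≠ 0 ∧ (PySem.List.slice l none (some i)).sum < i then
    let add := i - (PySem.List.slice l none (some i)).sum
    (p + add, l.set 0 ((PySem.List.pyGet? l 0).getD 0 + add))
  else
    (p, l)

def count (line : List Int) : Int :=
  if line.length == 0 then 0
  else ((PySem.List.pyRange 1 (line.length : Int) 1).foldl stepA (0, line)).1

-- ===== PORT B =====
-- one loop iteration of B: state (p, s, i) with s the running prefix sum
def stepB (st : Int × Int × Int) (x : Int) : Int × Int × Int :=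
  let p := st.1
  let s := st.2.1
  let i := st.2.2
  if x ≠ 0 ∧ s < i then
    (p + (i - s), i + x, i + 1)
  else
    (p, s + x, i + 1)

def count_alt (line : List Int) : Int :=
  match line with
  | [] => 0
  | a :: t => (t.foldl stepB (0, a, 1)).1

-- ===== PRECONDITION & SPEC =====
def Spec_count (line : List Int) (out : Int) : Prop := out = count_alt line
instance (line : List Int) (out : Int) : Decidable (Spec_count line out) := by unfold Spec_count; infer_instance

-- ===== CLAIM (what is proved, stated in full; the proofs are below) =====
def Claim_equal_count : Prop := ∀ (line : List Int), Dom_count line → Spec_count line (count line)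

-- ===== LEMMAS AND PROOFS =====

-- invariant: after A has processed indices 1 .. pre.length, the list is a :: (pre ++ t)
-- (only slot 0 ever changed) and B's running sum is a + pre.sum.
lemma loop_eq (t : List Int) : ∀ (pre : List Int) (a p : Int),
    ((PySem.List.pyRange (1 + (pre.length : Int)) (1 + (pre.length : Int) + t.length) 1).foldl
        stepA (p, a :: (pre ++ t))).1
      = (t.foldl stepB (p, a + pre.sum, 1 + (pre.length : Int))).1 := by
  induction t with
  | nil =>
    intro pre a p
    simp
  | cons x t' ih =>
    intro pre a p
    have hlt : (1 + (pre.length : Int)) < 1 + (pre.length : Int) + (x :: t').length := by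
      simp only [List.length_cons]; push_cast; omega
    rw [PySem.List.pyRange_one_cons hlt]
    rw [List.foldl_cons]
    -- evaluate one step of A at index j = 1 + pre.length
    have hj : (0 : Int) ≤ 1 + (pre.length : Int) := by positivity
    have hget : PySem.List.pyGet? (a :: (pre ++ x :: t')) (1 + (pre.length : Int)) = some x := by
      have : (1 + (pre.length : Int)) = (((a :: pre).length : Nat) : Int) := by
        simp; omega
      rw [this, ← List.cons_append]
      exact PySem.List.pyGet?_append_length (pre := a :: pre) (y := x) (ys := t')
    have hslice : PySem.List.slice (a :: (pre ++ x :: t')) none (some (1 + (pre.length : Int)))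
        = a :: pre := by
      rw [PySem.List.slice_to (a :: (pre ++ x :: t')) hj]
      have : (1 + (pre.length : Int)).toNat = (a :: pre).length := by simp; omega
      rw [this, ← List.cons_append, List.take_left]
    have hsum : (a :: pre).sum = a + pre.sum := by simp
    by_cases hc : x ≠ 0 ∧ a + pre.sum < 1 + (pre.length : Int)
    · -- A adds; line[0] becomes a + add
      have hA : stepA (p, a :: (pre ++ x :: t')) (1 + (pre.length : Int))
          = (p + ((1 + (pre.length : Int)) - (a + pre.sum)),
             (a + ((1 + (pre.length : Int)) - (a + pre.sum))) :: (pre ++ x :: t')) := by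
        simp only [stepA, hget, hslice, hsum]
        rw [if_pos (by simpa using hc)]
        simp [PySem.List.pyGet?_zero_cons, List.set]
      rw [hA]
      have hB : stepB (p, a + pre.sum, 1 + (pre.length : Int)) x
          = (p + ((1 + (pre.length : Int)) - (a + pre.sum)),
             (1 + (pre.length : Int)) + x, 1 + (pre.length : Int) + 1) := by
        simp only [stepB]
        rw [if_pos hc]
      rw [List.foldl_cons, hB]
      have hreassoc : (pre ++ x :: t') = (pre ++ [x]) ++ t' := by simp
      rw [hreassoc]
      have := ih (pre ++ [x]) (a + ((1 + (pre.length : Int)) - (a + pre.sum)))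
        (p + ((1 + (pre.length : Int)) - (a + pre.sum)))
      have hb1 : (1 + ((pre ++ [x]).length : Int)) = 1 + (pre.length : Int) + 1 := by
        simp; omega
      have hb2 : (1 + ((pre ++ [x]).length : Int) + (t'.length : Int))
          = 1 + (pre.length : Int) + ((x :: t').length : Int) := by simp; omega
      have hs : a + ((1 + (pre.length : Int)) - (a + pre.sum)) + (pre ++ [x]).sum
          = (1 + (pre.length : Int)) + x := by simp; ring
      rw [hb2, hb1, hs] at this
      exact this
    · -- A skips; the list is unchanged
      have hA : stepA (p, a :: (pre ++ x :: t')) (1 + (pre.length : Int))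
          = (p, a :: (pre ++ x :: t')) := by
        simp only [stepA, hget, hslice, hsum]
        rw [if_neg (by simpa using hc)]
      rw [hA]
      have hB : stepB (p, a + pre.sum, 1 + (pre.length : Int)) x
          = (p, a + pre.sum + x, 1 + (pre.length : Int) + 1) := by
        simp only [stepB]
        rw [if_neg hc]
      rw [List.foldl_cons, hB]
      have hreassoc : (pre ++ x :: t') = (pre ++ [x]) ++ t' := by simp
      rw [hreassoc]
      have := ih (pre ++ [x]) a p
      have hb1 : (1 + ((pre ++ [x]).length : Int)) = 1 + (pre.length : Int) + 1 := by
        simp; omega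
      have hb2 : (1 + ((pre ++ [x]).length : Int) + (t'.length : Int))
          = 1 + (pre.length : Int) + ((x :: t').length : Int) := by simp; omega
      have hs : a + (pre ++ [x]).sum = a + pre.sum + x := by simp; ring
      rw [hb2, hb1, hs] at this
      exact this

-- ===== VERDICT (by name: the statement is the Claim_ definition above) =====
theorem count_spec : Claim_equal_count := by
  intro line _
  unfold Spec_count
  match line with
  | [] => rfl
  | a :: t =>
    unfold count count_alt
    rw [if_neg (by simp)]
    have hlen : (((a :: t).length : Nat) : Int) = 1 + (t.length : Int) := by
      simp only [List.length_cons]; push_cast; omega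
    rw [hlen]
    simpa using loop_eq t [] a 0
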